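-- pv_equiv track=rewrite | github.com/ABoghi/MachineLearning | machine_learning_utils.py | polynomial_expansion_exponents
-- ===== SOURCE A (Python) =====
-- def polynomial_expansion_exponents(order: int, n_variables: int):
--     """
--     Parameters
--     ----------
--     order: int
--         polynomial order
--     n_variables: int
--         number of variables
--
--     """
--
--     pattern = [0] * n_variables
--     for current_sum in range(1, order+1):
--         pattern[0] = current_sum
--         yield tuple(pattern)
--         while pattern[-1] < current_sum:
--             for i in range(2, n_variables + 1):
--                 if 0 < pattern[n_variables - i]:
--                     pattern[n_variables - i] -= 1
--                     if 2 < i: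
--                         pattern[n_variables - i + 1] = 1 + pattern[-1]
--                         pattern[-1] = 0
--                     else:
--                         pattern[-1] += 1
--                     break
--             yield tuple(pattern)
--         pattern[-1] = 0
-- ===== SOURCE B (Python) =====
-- def _comps(s, k):
--     """Yield all k-tuples of nonnegative ints summing to s, first coordinate descending."""
--     if k == 1:
--         yield (s,)
--     else:
--         for first in range(s, -1, -1):
--             for rest in _comps(s - first, k - 1):
--                 yield (first,) + rest
--
-- def polynomial_expansion_exponents(order: int, n_variables: int):
--     for current_sum in range(1, order + 1):
--         yield from _comps(current_sum, n_variables)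
-- ===== Notes on version B (the rewrite author's own statement) =====
-- stated objective: simpler
-- what changed: A steps a mutable pattern in place with a successor-finding inner scan inside a while loop; B recursively enumerates all length-n nonnegative exponent tuples per total degree (first coordinate descending) as a generator, producing the same sequence.
import Mathlib
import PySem

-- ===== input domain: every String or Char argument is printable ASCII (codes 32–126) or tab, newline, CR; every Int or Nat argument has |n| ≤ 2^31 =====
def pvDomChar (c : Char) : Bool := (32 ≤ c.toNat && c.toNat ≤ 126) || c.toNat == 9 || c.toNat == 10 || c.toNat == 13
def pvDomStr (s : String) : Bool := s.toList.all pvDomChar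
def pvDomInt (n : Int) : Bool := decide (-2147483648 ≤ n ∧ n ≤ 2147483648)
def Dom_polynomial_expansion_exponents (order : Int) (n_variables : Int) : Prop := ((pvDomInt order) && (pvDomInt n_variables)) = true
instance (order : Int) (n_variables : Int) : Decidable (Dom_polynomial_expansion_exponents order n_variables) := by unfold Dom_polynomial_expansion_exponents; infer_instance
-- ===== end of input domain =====

-- B replaces A's in-place successor-stepping over a mutable pattern by a recursive
-- enumeration of compositions (first coordinate descending), concatenated per total degree: simpler.


-- ===== PORT A =====
-- the inner 'for i in range(2, n_variables+1): … break' scan, step for step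
def pvForScan (n : Int) (r : List Int) (p : List Int) : List Int :=
  match r with
  | [] => p
  | i :: rest =>
    if 0 < PySem.List.pyGetD p (n - i) 0 then
      let p1 := PySem.List.pySetD p (n - i) (PySem.List.pyGetD p (n - i) 0 - 1)
      if 2 < i then
        let p2 := PySem.List.pySetD p1 (n - i + 1) (1 + PySem.List.pyGetD p1 (-1) 0)
        PySem.List.pySetD p2 (-1) 0
      else
        PySem.List.pySetD p1 (-1) (PySem.List.pyGetD p1 (-1) 0 + 1)
    else pvForScan n rest p

def pvStep (n : Int) (p : List Int) : List Int :=
  pvForScan n (PySem.List.pyRange 2 (n+1) 1) p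

-- the 'while pattern[-1] < current_sum' loop; the fuel only makes it total and is
-- proved sufficient below (pvWhile_run / pvComps_length_le)
def pvWhile (fuel : Nat) (cs n : Int) (p : List Int) (acc : List (List Int)) : List Int × List (List Int) :=
  match fuel with
  | 0 => (p, acc)
  | fuel+1 =>
    if PySem.List.pyGetD p (-1) 0 < cs then
      let p' := pvStep n p
      pvWhile fuel cs n p' (acc ++ [p'])
    else (p, acc)

def polynomial_expansion_exponents (order : Int) (n_variables : Int) : List (List Int) :=
  ((PySem.List.pyRange 1 (order+1) 1).foldl
    (fun st cs =>
      let p := PySem.List.pySetD st.1 0 cs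
      let r := pvWhile ((cs.toNat + 1) ^ n_variables.toNat) cs n_variables p (st.2 ++ [p])
      (PySem.List.pySetD r.1 (-1) 0, r.2))
    (List.replicate n_variables.toNat 0, [])).2

-- ===== PORT B =====
-- all k-tuples of nonnegative ints summing to s, first coordinate descending (Source B's _comps)
def pvComps (s : Int) (k : Nat) : List (List Int) :=
  match k with
  | 0 => []
  | 1 => [[s]]
  | (k+2) => (PySem.List.pyRange s (-1) (-1)).flatMap
      (fun f => (pvComps (s - f) (k+1)).map (fun rest => f :: rest))

def polynomial_expansion_exponents_alt (order : Int) (n_variables : Int) : List (List Int) :=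
  (PySem.List.pyRange 1 (order+1) 1).flatMap (fun s => pvComps s n_variables.toNat)

-- ===== PRECONDITION & SPEC =====
-- A raises IndexError (pattern[0] on the empty pattern) whenever n_variables ≤ 0 and 1 ≤ order;
-- exactly those inputs are excluded (B also raises there, RecursionError).
def Pre_polynomial_expansion_exponents (order : Int) (n_variables : Int) : Prop :=
  order ≤ 0 ∨ 1 ≤ n_variables
instance (order : Int) (n_variables : Int) : Decidable (Pre_polynomial_expansion_exponents order n_variables) := by unfold Pre_polynomial_expansion_exponents; infer_instance

def pvWitness_polynomial_expansion_exponents : Int × Int := (3, 2)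

def Spec_polynomial_expansion_exponents (order : Int) (n_variables : Int) (out : List (List Int)) : Prop := out = polynomial_expansion_exponents_alt order n_variables
instance (order : Int) (n_variables : Int) (out : List (List Int)) : Decidable (Spec_polynomial_expansion_exponents order n_variables out) := by unfold Spec_polynomial_expansion_exponents; infer_instance

-- ===== CLAIM (what is proved, stated in full; the proofs are below) =====
def Claim_equal_polynomial_expansion_exponents : Prop := ∀ (order : Int) (n_variables : Int), Dom_polynomial_expansion_exponents order n_variables → Pre_polynomial_expansion_exponents order n_variables → Spec_polynomial_expansion_exponents order n_variables (polynomial_expansion_exponents order n_variables)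

-- ===== LEMMAS AND PROOFS =====

-- small PySem index facts
theorem pvGetD_cons_succ (g : Int) (u : List Int) (i : Int) (d : Int) (h : 0 ≤ i) :
    PySem.List.pyGetD (g :: u) (i+1) d = PySem.List.pyGetD u i d := by
  have h1 : i + 1 = ((i.toNat + 1 : Nat) : Int) := by omega
  have h2 : i = ((i.toNat : Nat) : Int) := by omega
  rw [h1, h2, PySem.List.pyGetD_natCast, PySem.List.pyGetD_natCast]
  simp [List.getD]
  rw [max_eq_left h]

theorem pvGetD_cons_neg_one (g : Int) (u : List Int) (d : Int) (h : u ≠ []) :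
    PySem.List.pyGetD (g :: u) (-1) d = PySem.List.pyGetD u (-1) d := by
  rw [PySem.List.pyGetD_neg_one (g::u) d (by simp), PySem.List.pyGetD_neg_one u d h]
  exact List.getLast_cons h

theorem pvSetD_cons_succ (g : Int) (u : List Int) (i : Int) (v : Int) (h : 0 ≤ i) :
    PySem.List.pySetD (g :: u) (i+1) v = g :: PySem.List.pySetD u i v := by
  rw [PySem.List.pySetD_of_nonneg (g::u) v (by omega), PySem.List.pySetD_of_nonneg u v h]
  have h1 : (i+1).toNat = i.toNat + 1 := by omega
  rw [h1]
  simp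

theorem pvSetD_cons_neg_one (g : Int) (u : List Int) (v : Int) (h : u ≠ []) :
    PySem.List.pySetD (g :: u) (-1) v = g :: PySem.List.pySetD u (-1) v := by
  have hp := List.length_pos_of_ne_nil h
  obtain ⟨n, hn⟩ : ∃ n, u.length = n + 1 := ⟨u.length - 1, by omega⟩
  simp [PySem.List.pySetD, PySem.List.pySet?, PySem.List.pyIdx?, hn]

theorem pvSetD_neg_one_append (xs : List Int) (x v : Int) :
    PySem.List.pySetD (xs ++ [x]) (-1) v = xs ++ [v] := by
  simp [PySem.List.pySetD, PySem.List.pySet?, PySem.List.pyIdx?]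

-- facts about pvComps
theorem pvComps_ne_nil (k : Nat) : ∀ (s : Int), 1 ≤ k → 0 ≤ s → pvComps s k ≠ [] := by
  induction k using Nat.strong_induction_on with
  | _ k ih =>
    intro s hk hs
    rcases k with _|k
    · omega
    rcases k with _|k
    · simp [pvComps]
    · rw [pvComps, PySem.List.pyRange_neg_one_cons (by omega)]
      simp only [List.flatMap_cons]
      have h1 : pvComps (0:Int) (k+1) ≠ [] := ih (k+1) (by omega) 0 (by omega) (by omega)
      simp [h1]

theorem pvComps_head (k : Nat) : ∀ (s : Int), 1 ≤ k → 0 ≤ s →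
    (pvComps s k).head? = some (s :: List.replicate (k-1) 0) := by
  induction k using Nat.strong_induction_on with
  | _ k ih =>
    intro s hk hs
    rcases k with _|k
    · omega
    rcases k with _|k
    · simp [pvComps]
    · rw [pvComps, PySem.List.pyRange_neg_one_cons (by omega)]
      simp only [List.flatMap_cons, sub_self]
      have h1 := ih (k+1) (by omega) 0 (by omega) (by omega)
      rcases h2 : pvComps (0:Int) (k+1) with _|⟨hd, tl⟩
      · rw [h2] at h1; simp at h1
      · rw [h2] at h1
        simp only [List.head?_cons, Option.some.injEq] at h1
        simp [h1, List.replicate_succ]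

-- the tail of pvComps s (k+2) from block f downward (proof-only helper)
def pvLb (s : Int) (k : Nat) (f : Int) : List (List Int) :=
  (PySem.List.pyRange f (-1) (-1)).flatMap (fun g => (pvComps (s-g) (k+1)).map (fun rest => g :: rest))

theorem pvComps_eq_pvLb (s : Int) (k : Nat) : pvComps s (k+2) = pvLb s k s := by
  rw [pvComps, pvLb]

theorem pvLb_ne_nil (s : Int) (k : Nat) (f : Int) (h0 : 0 ≤ f) (hf : f ≤ s) : pvLb s k f ≠ [] := by
  rw [pvLb, PySem.List.pyRange_neg_one_cons (by omega)]
  simp only [List.flatMap_cons]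
  have h1 : pvComps (s - f) (k+1) ≠ [] := pvComps_ne_nil (k+1) (s-f) (by omega) (by omega)
  simp [h1]

theorem pvLb_head (s : Int) (k : Nat) (f : Int) (h0 : 0 ≤ f) (hf : f ≤ s) :
    (pvLb s k f).head? = some (f :: (s-f) :: List.replicate k 0) := by
  rw [pvLb, PySem.List.pyRange_neg_one_cons (by omega)]
  simp only [List.flatMap_cons]
  have h1 := pvComps_head (k+1) (s-f) (by omega) (by omega)
  rcases h2 : pvComps (s-f) (k+1) with _|⟨hd,tl⟩
  · rw [h2] at h1; simp at h1
  · rw [h2] at h1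
    simp only [List.head?_cons, Option.some.injEq] at h1
    simp [h1]

theorem pvLb_last (s : Int) (k : Nat)
    (hIH : ∀ s' : Int, 0 ≤ s' → (pvComps s' (k+1)).getLast? = some (List.replicate k 0 ++ [s'])) :
    ∀ (m : Nat) (f : Int), f = (m:Int) → f ≤ s → 0 ≤ s →
    (pvLb s k f).getLast? = some (List.replicate (k+1) 0 ++ [s]) := by
  intro m
  induction m with
  | zero =>
    intro f hf hfs hs
    rw [pvLb, hf]
    rw [PySem.List.pyRange_neg_one_cons (by omega), PySem.List.pyRange_neg_one_eq_nil (by omega)]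
    simp only [Nat.cast_zero, List.flatMap_cons, List.flatMap_nil, List.append_nil, sub_zero]
    rw [List.getLast?_map, hIH s hs]
    simp [List.replicate_succ]
  | succ m ihm =>
    intro f hf hfs hs
    rw [pvLb, PySem.List.pyRange_neg_one_cons (by omega)]
    simp only [List.flatMap_cons]
    rw [show ((PySem.List.pyRange (f-1) (-1) (-1)).flatMap
          (fun g => (pvComps (s-g) (k+1)).map (fun rest => g :: rest))) = pvLb s k (f-1) from rfl]
    rw [List.getLast?_append_of_ne_nil _ (pvLb_ne_nil s k (f-1) (by omega) (by omega))]
    exact ihm (f-1) (by omega) (by omega) hs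

theorem pvComps_last (k : Nat) : ∀ (s : Int), 1 ≤ k → 0 ≤ s →
    (pvComps s k).getLast? = some (List.replicate (k-1) 0 ++ [s]) := by
  induction k using Nat.strong_induction_on with
  | _ k ih =>
    intro s hk hs
    rcases k with _|k
    · omega
    rcases k with _|k
    · simp [pvComps]
    · rw [pvComps_eq_pvLb]
      have hIH : ∀ s' : Int, 0 ≤ s' → (pvComps s' (k+1)).getLast? = some (List.replicate k 0 ++ [s']) := by
        intro s' hs'
        simpa using ih (k+1) (by omega) s' (by omega) hs'
      simpa using pvLb_last s k hIH s.toNat s (by omega) le_rfl hs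

theorem pvComps_mem (k : Nat) : ∀ (s : Int) (p : List Int), 0 ≤ s → p ∈ pvComps s k →
    p.length = k ∧ p.sum = s ∧ ∀ x ∈ p, 0 ≤ x := by
  induction k using Nat.strong_induction_on with
  | _ k ih =>
    intro s p hs hp
    rcases k with _|k
    · simp [pvComps] at hp
    rcases k with _|k
    · simp [pvComps] at hp
      subst hp
      refine ⟨by simp, by simp, by simp [hs]⟩
    · rw [pvComps] at hp
      rw [List.mem_flatMap] at hp
      obtain ⟨g, hg, hpg⟩ := hp
      rw [PySem.List.mem_pyRange_neg_one] at hg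
      rw [List.mem_map] at hpg
      obtain ⟨rest, hrest, hpeq⟩ := hpg
      obtain ⟨hl, hsum, hpos⟩ := ih (k+1) (by omega) (s-g) rest (by omega) hrest
      subst hpeq
      refine ⟨by simp [hl], by rw [List.sum_cons, hsum]; ring, ?_⟩
      intro x hx
      rcases List.mem_cons.mp hx with h | h
      · omega
      · exact hpos x h

theorem pvComps_length_le (k : Nat) : ∀ (m S : Int), 0 ≤ m → m ≤ S →
    (pvComps m k).length ≤ (S.toNat + 1) ^ k := by
  induction k using Nat.strong_induction_on with
  | _ k ih =>
    intro m S h0 hS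
    rcases k with _|k
    · simp [pvComps]
    rcases k with _|k
    · simp [pvComps]
    · rw [pvComps]
      rw [List.length_flatMap]
      have hb : ∀ x ∈ ((PySem.List.pyRange m (-1) (-1)).map
          (fun f => ((pvComps (m - f) (k+1)).map (fun rest => f :: rest)).length)),
          x ≤ (S.toNat + 1) ^ (k+1) := by
        intro x hx
        rw [List.mem_map] at hx
        obtain ⟨g, hg, hxe⟩ := hx
        rw [PySem.List.mem_pyRange_neg_one] at hg
        subst hxe
        simpa using ih (k+1) (by omega) (m-g) S (by omega) (by omega)
      calc ((PySem.List.pyRange m (-1) (-1)).map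
              (fun f => ((pvComps (m - f) (k+1)).map (fun rest => f :: rest)).length)).sum
          ≤ ((PySem.List.pyRange m (-1) (-1)).map
              (fun f => ((pvComps (m - f) (k+1)).map (fun rest => f :: rest)).length)).length
              • ((S.toNat + 1) ^ (k+1)) := List.sum_le_card_nsmul _ _ hb
        _ ≤ (S.toNat + 1) ^ (k+2) := by
              rw [List.length_map, PySem.List.length_pyRange_neg_one]
              have h1 : (m - -1).toNat ≤ S.toNat + 1 := by omega
              calc (m - -1).toNat • ((S.toNat + 1) ^ (k+1))
                  = (m - -1).toNat * ((S.toNat + 1) ^ (k+1)) := by rw [smul_eq_mul]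
                _ ≤ (S.toNat + 1) * ((S.toNat + 1) ^ (k+1)) := Nat.mul_le_mul_right _ h1
                _ = (S.toNat + 1) ^ (k+2) := by ring

-- the scan lifts over a cons while it fires strictly inside the tail
theorem pvScan_lift (k : Nat) (g : Int) (u : List Int) (hu : u.length = k+1) :
    ∀ (m : Nat) (a : Int), a = (k:Int) + 2 - m → 2 ≤ a →
    (∃ i : Int, a ≤ i ∧ i ≤ (k:Int)+1 ∧ 0 < PySem.List.pyGetD u ((k:Int)+1-i) 0) →
    pvForScan ((k:Int)+2) (PySem.List.pyRange a ((k:Int)+3) 1) (g :: u)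
      = g :: pvForScan ((k:Int)+1) (PySem.List.pyRange a ((k:Int)+2) 1) u := by
  intro m
  induction m with
  | zero =>
    intro a ha h2 hex
    obtain ⟨i, hi1, hi2, _⟩ := hex
    omega
  | succ m ihm =>
    intro a ha h2 hex
    obtain ⟨i, hi1, hi2, hi3⟩ := hex
    have hak : a ≤ (k:Int)+1 := le_trans hi1 hi2
    rw [PySem.List.pyRange_one_cons (show a < (k:Int)+3 by omega),
        PySem.List.pyRange_one_cons (show a < (k:Int)+2 by omega)]
    simp only [pvForScan]
    have e1 : (k:Int)+2-a = ((k:Int)+1-a)+1 := by ring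
    rw [e1, pvGetD_cons_succ g u _ 0 (by omega)]
    by_cases hfa : 0 < PySem.List.pyGetD u ((k:Int)+1-a) 0
    · rw [if_pos hfa, if_pos hfa]
      rw [pvSetD_cons_succ g u _ _ (by omega)]
      set u1 := PySem.List.pySetD u ((k:Int)+1-a) (PySem.List.pyGetD u ((k:Int)+1-a) 0 - 1) with hu1
      have hu1ne : u1 ≠ [] := by
        intro hcon
        have := PySem.List.length_pySetD u ((k:Int)+1-a) (PySem.List.pyGetD u ((k:Int)+1-a) 0 - 1)
        rw [← hu1, hcon] at this
        simp [hu] at this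
      by_cases h2a : 2 < a
      · rw [if_pos h2a, if_pos h2a]
        have e2 : (k:Int)+1-a+1+1 = ((k:Int)+1-a+1)+1 := by ring
        rw [e2, pvGetD_cons_neg_one g u1 0 hu1ne,
            pvSetD_cons_succ g u1 _ _ (by omega)]
        rw [pvSetD_cons_neg_one _ _ _ (by
          intro hcon
          have := PySem.List.length_pySetD u1 ((k:Int)+1-a+1) (1 + PySem.List.pyGetD u1 (-1) 0)
          rw [hcon] at this
          have hl1 := PySem.List.length_pySetD u ((k:Int)+1-a) (PySem.List.pyGetD u ((k:Int)+1-a) 0 - 1)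
          rw [← hu1] at hl1
          rw [hl1, hu] at this
          simp at this)]
      · rw [if_neg h2a, if_neg h2a]
        rw [pvGetD_cons_neg_one g u1 0 hu1ne, pvSetD_cons_neg_one g u1 _ hu1ne]
    · rw [if_neg hfa, if_neg hfa]
      have hia : a ≠ i := by
        intro hcon
        rw [← hcon] at hi3
        omega
      exact ihm (a+1) (by omega) (by omega) ⟨i, by omega, hi2, hi3⟩


-- the scan on (f, 0, …, 0, s') with 0 < f
theorem pvScan_skip (k : Nat) (f s' : Int) : ∀ (m : Nat), m ≤ k →
    pvForScan ((k:Int)+2) (PySem.List.pyRange ((k:Int)+2-m) ((k:Int)+3) 1) (f :: (List.replicate k 0 ++ [s']))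
      = pvForScan ((k:Int)+2) (PySem.List.pyRange ((k:Int)+2) ((k:Int)+3) 1) (f :: (List.replicate k 0 ++ [s'])) := by
  intro m
  induction m with
  | zero => intro _; norm_num
  | succ m ihm =>
    intro hm
    push_cast
    rw [PySem.List.pyRange_one_cons (show (k:Int)+2-((m:Int)+1) < (k:Int)+3 by omega)]
    simp only [pvForScan]
    have e1 : (k:Int)+2-((k:Int)+2-(m+1)) = ((m:Int))+1 := by ring
    rw [e1, pvGetD_cons_succ f _ _ 0 (by omega)]
    have hval : PySem.List.pyGetD (List.replicate k (0:Int) ++ [s']) ((m:Int)) 0 = 0 := by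
      rw [PySem.List.pyGetD_natCast]
      rw [List.getD_append _ _ _ _ (by simp; omega)]
      exact List.getD_replicate _ (by omega)
    rw [hval]
    rw [if_neg (by omega)]
    have e2 : (k:Int)+2-(m+1)+1 = (k:Int)+2-m := by ring
    rw [e2]
    exact ihm (by omega)

theorem pvSetD_zero_cons (x : Int) (xs : List Int) (v : Int) :
    PySem.List.pySetD (x :: xs) 0 v = v :: xs := by
  rw [PySem.List.pySetD_of_nonneg (x::xs) v le_rfl]; simp

theorem pvScan_boundary (k : Nat) (f s' : Int) (hf : 0 < f) :
    pvStep ((k:Int)+2) (f :: (List.replicate k 0 ++ [s'])) = (f-1) :: (s'+1) :: List.replicate k 0 := by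
  have hs := pvScan_skip k f s' k le_rfl
  rw [show (k:Int)+2-(k:Int) = 2 from by ring] at hs
  rw [pvStep, show (k:Int)+2+1 = (k:Int)+3 by ring, hs]
  rw [PySem.List.pyRange_one_cons (by omega), PySem.List.pyRange_one_eq_nil (by omega)]
  simp only [pvForScan, sub_self]
  rw [PySem.List.pyGetD_zero_cons]
  rw [if_pos hf]
  rcases k with _|j
  · rw [if_neg (show ¬((2:Int) < ((0:Nat):Int)+2) from by omega)]
    simp only [List.replicate_zero, List.nil_append]
    rw [pvSetD_zero_cons]
    rw [show ((f-1) :: [s'] : List Int) = [f-1] ++ [s'] from rfl,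
        PySem.List.pyGetD_neg_one_append_singleton, pvSetD_neg_one_append]
    simp
  · rw [if_pos (show (2:Int) < ((j+1:Nat):Int)+2 from by omega)]
    rw [pvSetD_zero_cons]
    rw [← List.cons_append, PySem.List.pyGetD_neg_one_append_singleton, List.cons_append]
    rw [pvSetD_cons_succ _ _ _ _ le_rfl]
    rw [List.replicate_succ, List.cons_append, pvSetD_zero_cons]
    rw [show (f-1) :: ((1 + s') :: (List.replicate j 0 ++ [s'])) = ((f-1) :: (1+s') :: List.replicate j 0) ++ [s'] from by simp,
        pvSetD_neg_one_append]
    simp [add_comm]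
    rw [← List.replicate_succ', ← List.replicate_succ]

-- chain helper with membership
theorem pvChain'_imp_mem {α : Type} {R S : α → α → Prop} :
    ∀ l : List α, (∀ a ∈ l, ∀ b ∈ l, R a b → S a b) → List.IsChain R l → List.IsChain S l
  | [] => by intro _ _; exact List.isChain_nil
  | [a] => by intro _ _; exact List.isChain_singleton a
  | a :: b :: t => by
    intro h hc
    rw [List.isChain_cons_cons] at hc ⊢
    exact ⟨h a (by simp) b (by simp) hc.1,
      pvChain'_imp_mem (b::t) (fun x hx y hy => h x (by simp [hx]) y (by simp [hy])) hc.2⟩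

-- a non-final composition has a positive early coordinate
theorem pvComps_fire (k : Nat) (m : Int) (u : List Int)
    (hlen : u.length = k+1) (hsum : u.sum = m) (hpos : ∀ x ∈ u, 0 ≤ x)
    (hlast : PySem.List.pyGetD u (-1) 0 < m) :
    ∃ j : Nat, j < k ∧ 0 < u.getD j 0 := by
  have hne : u ≠ [] := by intro h'; rw [h'] at hlen; simp at hlen
  have hget : PySem.List.pyGetD u (-1) 0 = u.getLast hne := PySem.List.pyGetD_neg_one u 0 hne
  by_contra hcon
  push Not at hcon
  have hdz : ∀ y ∈ u.dropLast, y = 0 := by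
    intro y hy
    obtain ⟨j, hj, hjy⟩ := List.mem_iff_getElem.mp hy
    have hjk : j < k := by
      have hh := hj
      rw [List.length_dropLast, hlen] at hh
      omega
    have hju : j < u.length := by omega
    have he : u.dropLast[j]'hj = u[j]'hju := List.getElem_dropLast ..
    have hdj := hcon j hjk
    rw [List.getD_eq_getElem u 0 hju] at hdj
    have hyy : 0 ≤ y := hpos y (List.mem_of_mem_dropLast hy)
    omega
  have hsum0 : u.dropLast.sum = 0 := List.sum_eq_zero hdz
  have hu := congrArg List.sum (List.dropLast_append_getLast hne)
  rw [List.sum_append, hsum0, List.sum_singleton, zero_add] at hu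
  rw [hu, hsum] at hget
  omega

-- A's while-body successor steps through pvComps in order
theorem pvChain_comps (k : Nat) : ∀ (s : Int), 0 ≤ s →
    List.IsChain (fun p q => PySem.List.pyGetD p (-1) 0 < s ∧ pvStep (k:Int) p = q) (pvComps s k) := by
  induction k using Nat.strong_induction_on with
  | _ k ih =>
    intro s hs
    rcases k with _|k
    · exact List.isChain_nil
    rcases k with _|j
    · rw [pvComps]
      exact List.isChain_singleton _
    · have hblock : ∀ g : Int, 0 ≤ g → g ≤ s →
          List.IsChain (fun p q => PySem.List.pyGetD p (-1) 0 < s ∧ pvStep ((j:Int)+2) p = q)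
            ((pvComps (s-g) (j+1)).map (fun rest => g :: rest)) := by
        intro g hg hgs
        rw [List.isChain_map]
        have hin := ih (j+1) (by omega) (s-g) (by omega)
        apply pvChain'_imp_mem _ _ hin
        intro u hu v hv huv
        obtain ⟨hul, hus, hupos⟩ := pvComps_mem (j+1) (s-g) u (by omega) hu
        have hune : u ≠ [] := by intro h'; rw [h'] at hul; simp at hul
        refine ⟨?_, ?_⟩
        · rw [pvGetD_cons_neg_one g u 0 hune]
          have := huv.1
          omega
        · obtain ⟨jj, hjj, hjpos⟩ := pvComps_fire j (s-g) u hul hus hupos huv.1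
          have hfire : ∃ i : Int, 2 ≤ i ∧ i ≤ (j:Int)+1 ∧ 0 < PySem.List.pyGetD u ((j:Int)+1-i) 0 := by
            refine ⟨(j:Int)+1-jj, by omega, by omega, ?_⟩
            rw [show (j:Int)+1-((j:Int)+1-(jj:Int)) = ((jj:Nat):Int) from by ring, PySem.List.pyGetD_natCast]
            exact hjpos
          have hl := pvScan_lift j g u hul j 2 (by omega) (by omega) hfire
          have hv2 := huv.2
          rw [pvStep] at hv2
          push_cast at hv2
          rw [show (j:Int)+1+1 = (j:Int)+2 from by ring] at hv2
          show pvStep ((j:Int)+2) (g :: u) = g :: v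
          rw [pvStep, show (j:Int)+2+1 = (j:Int)+3 from by ring, hl, hv2]
      have hLb : ∀ (m : Nat) (f : Int), f = (m:Int) → f ≤ s →
          List.IsChain (fun p q => PySem.List.pyGetD p (-1) 0 < s ∧ pvStep ((j:Int)+2) p = q) (pvLb s j f) := by
        intro m
        induction m with
        | zero =>
          intro f hf hfs
          rw [pvLb, PySem.List.pyRange_neg_one_cons (by omega), PySem.List.pyRange_neg_one_eq_nil (by omega)]
          simp only [List.flatMap_cons, List.flatMap_nil, List.append_nil]
          exact hblock f (by omega) hfs
        | succ m ihm =>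
          intro f hf hfs
          rw [pvLb, PySem.List.pyRange_neg_one_cons (by omega)]
          simp only [List.flatMap_cons]
          rw [show ((PySem.List.pyRange (f-1) (-1) (-1)).flatMap
                (fun g => (pvComps (s-g) (j+1)).map (fun rest => g :: rest))) = pvLb s j (f-1) from rfl]
          rw [List.isChain_append]
          refine ⟨hblock f (by omega) hfs, ihm (f-1) (by omega) (by omega), ?_⟩
          intro x hx y hy
          rw [List.getLast?_map, pvComps_last (j+1) (s-f) (by omega) (by omega)] at hx
          rw [pvLb_head s j (f-1) (by omega) (by omega)] at hy
          simp only [Option.mem_def, Option.map_some, Option.some.injEq] at hx hy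
          subst hx
          subst hy
          refine ⟨?_, ?_⟩
          · simp only [Nat.add_sub_cancel]
            rw [← List.cons_append, PySem.List.pyGetD_neg_one_append_singleton]
            omega
          · simp only [Nat.add_sub_cancel]
            show pvStep ((j:Int)+2) (f :: (List.replicate j 0 ++ [s-f])) = _
            rw [pvScan_boundary j f (s-f) (by omega)]
            rw [show s - (f-1) = (s-f)+1 from by ring]
      have hfin := hLb s.toNat s (by omega) le_rfl
      rw [pvComps_eq_pvLb]
      exact hfin

-- the while loop emits exactly the remaining suffix of pvComps and ends on (0,…,0,s)

-- the while loop emits exactly the remaining suffix of pvComps and ends on (0,…,0,s)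
theorem pvWhile_run (s : Int) (hs : 1 ≤ s) (k : Nat) (hk : 1 ≤ k) :
    ∀ (l₂ l₁ : List (List Int)) (p : List Int) (acc : List (List Int)) (fuel : Nat),
      pvComps s k = l₁ ++ p :: l₂ → l₂.length ≤ fuel →
      pvWhile fuel s (k:Int) p acc = (List.replicate (k-1) 0 ++ [s], acc ++ l₂) := by
  intro l₂
  induction l₂ with
  | nil =>
    intro l₁ p acc fuel h hf
    have hlast := pvComps_last k s hk (by omega)
    rw [h, List.getLast?_concat] at hlast
    have hp : p = List.replicate (k-1) 0 ++ [s] := by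
      injection hlast
    subst hp
    cases fuel with
    | zero => simp [pvWhile]
    | succ f => simp [pvWhile]
  | cons q l₂ ihl =>
    intro l₁ p acc fuel h hf
    rcases fuel with _|f
    · simp at hf
    have hch := pvChain_comps k s (by omega)
    rw [h] at hch
    have h2 := hch.right_of_append
    rw [List.isChain_cons_cons] at h2
    obtain ⟨⟨hg, hstep⟩, _⟩ := h2
    rw [pvWhile, if_pos hg, hstep]
    have := ihl (l₁ ++ [p]) q (acc ++ [q]) f (by rw [h]; simp) (by simpa using hf)
    rw [this]
    simp

-- the outer for-loop accumulates the concatenation of the per-degree blocks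

-- the outer for-loop accumulates the concatenation of the per-degree blocks
theorem pvOuter (k : Nat) (hk : 1 ≤ k) :
    ∀ (m : Nat) (acc : List (List Int)),
      ((PySem.List.pyRange 1 ((m:Int)+1) 1).foldl
        (fun st cs =>
          let p := PySem.List.pySetD st.1 0 cs
          let r := pvWhile ((cs.toNat + 1) ^ ((k:Int)).toNat) cs (k:Int) p (st.2 ++ [p])
          (PySem.List.pySetD r.1 (-1) 0, r.2))
        (List.replicate ((k:Int)).toNat 0, acc))
      = (List.replicate ((k:Int)).toNat 0,
         acc ++ (PySem.List.pyRange 1 ((m:Int)+1) 1).flatMap (fun s => pvComps s k)) := by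
  simp only [Int.toNat_natCast]
  intro m
  induction m with
  | zero =>
    intro acc
    rw [PySem.List.pyRange_one_eq_nil (by omega)]
    simp
  | succ m ihm =>
    intro acc
    have hr : PySem.List.pyRange 1 (((m+1:Nat):Int)+1) 1
        = PySem.List.pyRange 1 ((m:Int)+1) 1 ++ [(m:Int)+1] := by
      push_cast
      exact PySem.List.pyRange_one_succ_right (by omega)
    rw [hr, List.foldl_append, List.flatMap_append, ihm acc]
    simp only [List.foldl_cons, List.foldl_nil]
    have hp : PySem.List.pySetD (List.replicate k (0:Int)) 0 ((m:Int)+1)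
        = ((m:Int)+1) :: List.replicate (k-1) 0 := by
      obtain ⟨k', hk'⟩ : ∃ k', k = k'+1 := ⟨k-1, by omega⟩
      rw [hk', List.replicate_succ, pvSetD_zero_cons]
      simp
    simp only [hp]
    have hh := pvComps_head k ((m:Int)+1) hk (by omega)
    rcases hcs : pvComps ((m:Int)+1) k with _|⟨hd, tl⟩
    · rw [hcs] at hh; simp at hh
    · rw [hcs] at hh
      simp only [List.head?_cons, Option.some.injEq] at hh
      subst hh
      have hlen : tl.length ≤ (((m:Int)+1).toNat + 1) ^ k := by
        have hle := pvComps_length_le k ((m:Int)+1) ((m:Int)+1) (by omega) le_rfl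
        rw [hcs] at hle
        simp only [List.length_cons] at hle
        omega
      have hw := pvWhile_run ((m:Int)+1) (by omega) k hk tl []
          ((((m:Int)+1)) :: List.replicate (k-1) 0)
          ((acc ++ (PySem.List.pyRange 1 ((m:Int)+1) 1).flatMap (fun s => pvComps s k))
            ++ [(((m:Int)+1)) :: List.replicate (k-1) 0])
          ((((m:Int)+1).toNat + 1) ^ k) (by rw [hcs]; simp) hlen
      rw [hw]
      have hset : PySem.List.pySetD (List.replicate (k-1) (0:Int) ++ [(m:Int)+1]) (-1) 0
          = List.replicate k 0 := by
        rw [pvSetD_neg_one_append, ← List.replicate_succ']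
        congr 1
        omega
      rw [hset]
      simp [hcs, List.append_assoc]

-- ===== VERDICT (by name: the statement is the Claim_ definition above) =====
theorem polynomial_expansion_exponents_spec : Claim_equal_polynomial_expansion_exponents := by
  intro order n _hdom hpre
  unfold Spec_polynomial_expansion_exponents
  unfold polynomial_expansion_exponents polynomial_expansion_exponents_alt
  by_cases ho : order ≤ 0
  · rw [PySem.List.pyRange_one_eq_nil (by omega)]
    simp
  · have hn : 1 ≤ n := hpre.resolve_left ho
    have hk : 1 ≤ n.toNat := by omega
    have hncast : ((n.toNat : Int)) = n := Int.toNat_of_nonneg (by omega)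
    have hm : ((order.toNat : Int)) = order := Int.toNat_of_nonneg (by omega)
    have := pvOuter n.toNat hk order.toNat []
    rw [hncast, hm] at this
    rw [this]
    simp
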